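-- pv_equiv track=rewrite | github.com/piotrhelm/NESTFUL | data_v2/executable_functions/py_code_file_1402.py | build_char_dict
-- ===== SOURCE A (Python) =====
-- from typing import Dict
--
-- def build_char_dict(word: str) -> Dict[str, int]:
--
--     """Builds a dictionary where the keys are the unique characters in the string and the values are their corresponding minimum indices in the string.
--
--
--
--     Args:
--
--         word: The input string.
--
--
--
--     Returns:
--
--         A dictionary where the keys are the unique characters in the string and the values are their corresponding minimum indices in the string.
--
--     """
--
--     d = {}
--
--     for i, char in enumerate(word):
--
--         if char in d:
--
--             d[char] = min(d[char], i)
--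
--         else:
--
--             d[char] = i
--
--     return d
-- ===== SOURCE B (Python) =====
-- def build_char_dict(word: str):
--     # first-occurrence order via dict.fromkeys; value = first index via str.index
--     return {c: word.index(c) for c in dict.fromkeys(word)}
-- ===== Notes on version B (the rewrite author's own statement) =====
-- stated objective: idiomatic
-- what changed: Replaces the running loop with membership test and min by a dict comprehension over dict.fromkeys(word) (unique chars in first-occurrence order) with word.index(c) supplying each first index.
import Mathlib
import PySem

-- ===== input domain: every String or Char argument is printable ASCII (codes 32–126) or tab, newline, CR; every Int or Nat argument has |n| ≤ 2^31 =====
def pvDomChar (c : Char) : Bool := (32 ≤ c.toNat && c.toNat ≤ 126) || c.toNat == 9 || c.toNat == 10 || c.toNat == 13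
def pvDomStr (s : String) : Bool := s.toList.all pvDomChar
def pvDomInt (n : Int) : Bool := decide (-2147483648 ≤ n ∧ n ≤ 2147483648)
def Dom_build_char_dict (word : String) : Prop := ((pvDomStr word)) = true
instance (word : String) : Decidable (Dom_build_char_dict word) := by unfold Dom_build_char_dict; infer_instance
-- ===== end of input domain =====

-- B replaces A's running loop (membership test + min) by a comprehension over the
-- deduplicated characters, looking each first index up with word.index (idiomatic).

-- ===== PORT A =====
-- d = {}; for i, char in enumerate(word): d[char] = min(d[char], i) if char in d else i
def build_char_dict (word : String) : List (String × Int) :=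
  ((PySem.List.enumerate word.toList 0).foldl
    (fun d p =>
      let c := String.ofList [p.2]
      if d.contains c then d.insert c (min (d.getD c 0) p.1)
      else d.insert c p.1)
    PySem.Dict.empty).items

-- ===== PORT B =====
-- {c: word.index(c) for c in dict.fromkeys(word)}
def build_char_dict_alt (word : String) : List (String × Int) :=
  (PySem.List.dedup word.toList).map
    (fun c => (String.ofList [c], (((PySem.List.index? word.toList c).getD 0 : Nat) : Int)))

-- ===== PRECONDITION & SPEC =====
def Spec_build_char_dict (word : String) (out : List (String × Int)) : Prop := out = build_char_dict_alt word
instance (word : String) (out : List (String × Int)) : Decidable (Spec_build_char_dict word out) := by unfold Spec_build_char_dict; infer_instance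

-- ===== CLAIM (what is proved, stated in full; the proofs are below) =====
def Claim_equal_build_char_dict : Prop := ∀ (word : String), Dom_build_char_dict word → Spec_build_char_dict word (build_char_dict word)

-- ===== LEMMAS AND PROOFS =====

def pvStepA (d : PySem.Dict String Int) (p : Int × Char) : PySem.Dict String Int :=
  let c := String.ofList [p.2]
  if d.contains c then d.insert c (min (d.getD c 0) p.1) else d.insert c p.1

theorem pv_mkS_inj {a b : Char} (h : String.ofList [a] = String.ofList [b]) : a = b := by
  have := congrArg String.toList h
  simpa using this

theorem pv_items_insert_same {d : PySem.Dict String Int} {k : String} {v : Int}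
    (hn : d.keys.Nodup) (hm : (k, v) ∈ d.items) : (d.insert k v).items = d.items := by
  have hc : d.contains k = true := by
    rw [PySem.Dict.contains_iff_mem_keys]
    exact PySem.Dict.mem_keys_of_mem_items d hm
  rw [PySem.Dict.items_insert_of_contains d v hc]
  have hget : d.get? k = some v := PySem.Dict.get?_of_mem_items d hm hn
  conv_rhs => rw [← List.map_id d.items]
  apply List.map_congr_left
  intro p hp
  by_cases h : p.1 = k
  · have hget2 : d.get? p.1 = some p.2 := PySem.Dict.get?_of_mem_items d (by exact (Prod.mk.eta ▸ hp)) hn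
    rw [h] at hget2
    have : p.2 = v := by rw [hget] at hget2; exact (Option.some.injEq _ _ ▸ hget2).symm
    subst h
    simp [← this]
  · simp [h]

theorem pv_inv (l : List Char) :
    ((PySem.List.enumerate l 0).foldl pvStepA PySem.Dict.empty).items
      = (PySem.List.dedup l).map
          (fun c => (String.ofList [c], (((PySem.List.index? l c).getD 0 : Nat) : Int))) := by
  induction l using List.reverseRecOn with
  | nil => rfl
  | append_singleton l c ih =>
    rw [PySem.List.enumerate_append, List.foldl_append,
        PySem.List.enumerate_cons, PySem.List.enumerate_nil]
    set D := (PySem.List.enumerate l 0).foldl pvStepA PySem.Dict.empty with hD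
    have hkeys : D.keys = (PySem.List.dedup l).map (fun c => String.ofList [c]) := by
      show D.items.map (·.1) = _
      rw [ih, List.map_map]; rfl
    have hnodup : D.keys.Nodup := by
      rw [hkeys]
      exact (PySem.List.dedup_eq_ofList l ▸ PySem.Set.nodup_ofList l).map
        (fun a b h => pv_mkS_inj h)
    simp only [List.foldl_cons, List.foldl_nil]
    by_cases hc : c ∈ l
    · -- existing key: min is a no-op and the dict is unchanged
      obtain ⟨j, hj⟩ : ∃ j, PySem.List.index? l c = some j := by
        rw [Option.isSome_iff_exists.symm, PySem.List.index?_isSome_iff]; exact hc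
      obtain ⟨hjlt, -, -⟩ := PySem.List.getElem_of_index?_eq_some hj
      have hmemdedup : c ∈ PySem.List.dedup l := by
        rw [PySem.List.mem_dedup]; exact hc
      have hitem : (String.ofList [c], ((j : Nat) : Int)) ∈ D.items := by
        rw [ih]
        exact List.mem_map.mpr ⟨c, hmemdedup, by rw [hj]; rfl⟩
      have hcont : D.contains (String.ofList [c]) = true := by
        rw [PySem.Dict.contains_iff_mem_keys]
        exact PySem.Dict.mem_keys_of_mem_items D hitem
      have hgetD : D.getD (String.ofList [c]) 0 = ((j : Nat) : Int) :=
        PySem.Dict.getD_of_mem_items D hitem hnodup 0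
      have hmin : min (D.getD (String.ofList [c]) 0) (0 + (l.length : Int)) = ((j : Nat) : Int) := by
        rw [hgetD]
        have : (j : Int) ≤ 0 + (l.length : Int) := by exact_mod_cast by omega
        omega
      show (pvStepA D (0 + (l.length : Int), c)).items = _
      unfold pvStepA
      simp only [hcont, if_true]
      rw [hmin, pv_items_insert_same hnodup hitem, ih]
      -- RHS: dedup and indices unchanged
      have hded : PySem.List.dedup (l ++ [c]) = PySem.List.dedup l := by
        simp only [PySem.List.dedup_eq_ofList, PySem.Set.ofList_append_singleton]
        exact PySem.Set.add_of_mem (by rw [PySem.Set.mem_ofList]; exact hc)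
      rw [hded]
      apply List.map_congr_left
      intro x hx
      have hxl : x ∈ l := by rwa [PySem.List.mem_dedup] at hx
      rw [PySem.List.index?_append_of_mem _ hxl]
    · -- new key: appended at the end with index l.length
      have hncont : D.contains (String.ofList [c]) = false := by
        rw [← Bool.not_eq_true, PySem.Dict.contains_iff_mem_keys, hkeys]
        intro hmem
        obtain ⟨x, hx, hxe⟩ := List.mem_map.mp hmem
        exact hc (pv_mkS_inj hxe ▸ (PySem.List.mem_dedup l x).mp hx)
      show (pvStepA D (0 + (l.length : Int), c)).items = _
      unfold pvStepA
      simp only [hncont, Bool.false_eq_true, if_false]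
      rw [PySem.Dict.items_insert_of_not_contains D _ hncont, ih]
      have hded : PySem.List.dedup (l ++ [c]) = PySem.List.dedup l ++ [c] := by
        simp only [PySem.List.dedup_eq_ofList, PySem.Set.ofList_append_singleton]
        exact PySem.Set.add_of_not_mem (by rw [PySem.Set.mem_ofList]; exact hc)
      rw [hded, List.map_append]
      congr 1
      · apply List.map_congr_left
        intro x hx
        have hxl : x ∈ l := by rwa [PySem.List.mem_dedup] at hx
        rw [PySem.List.index?_append_of_mem _ hxl]
      · simp only [List.map_cons, List.map_nil,
          PySem.List.index?_append_singleton_self l c hc, Option.getD_some]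
        norm_num

-- ===== VERDICT (by name: the statement is the Claim_ definition above) =====
theorem build_char_dict_spec : Claim_equal_build_char_dict := by
  intro word _
  show build_char_dict word = build_char_dict_alt word
  unfold build_char_dict build_char_dict_alt
  exact pv_inv word.toList
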